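-- pv_equiv track=rewrite | github.com/PdxCodeGuild/class_koi | code/logan/python/lab09v3.py | rainfall
-- ===== SOURCE A (Python) =====
-- def rainfall(input_art):
-- #"""
-- # This 'pours water' on the mountains in the appropriate places,
-- # allowing it to be visualized and counted later.
-- #
-- #
-- # Really what it does is output a new list of stackable strings that
-- # have Os everywhere water would come to rest in our visual
-- # model.
-- # """
--     art_after_rain = []
--     for line in input_art:
--         string_after_rain = ""
--         pools = []
--         for char_index in range(0, len(line)):
--             if line[char_index] == "X" and char_index != (len(line) - 1):
--                 if line[char_index + 1] == " ":
--                     pool_search = True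
--                     # Testing loop...
--                     while pool_search == True:
--                         for ii_char_index in range(char_index + 1, len(line)):
--                             if line[ii_char_index] == "X":
--                                 pools.append((char_index, ii_char_index))
--                                 pool_search = False
--                                 break
--                             elif line[ii_char_index] != "X" and ii_char_index == (len(line) - 1):
--                                 pool_search = False
--                                 break
--         # Pool finder seems to work...on to this section
--         for char_index in range(0, len(line)):
--             wet = False
--             if line[char_index] == " ":
--                 for pool in pools:
--                     if char_index in range(pool[0], pool[1]):
--                         # string_after_rain += "O"
--                         wet = True
--                         break
--
--                 if wet == True:
--                     string_after_rain += "O"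
--                     wet = False
--                 else:
--                     string_after_rain += " "
--             else:
--                 string_after_rain += "X"
--         art_after_rain.append(string_after_rain)
--     return art_after_rain
-- ===== SOURCE B (Python) =====
-- def rainfall(input_art):
--     # O(n) per line: precompute nearest-X-to-the-left and has-X-to-the-right
--     # arrays in two single passes, then decide each space position directly.
--     art_after_rain = []
--     for line in input_art:
--         n = len(line)
--         last_x = [None] * n          # last_x[k] = greatest i < k with line[i] == 'X'
--         prev = None
--         for k in range(n):
--             last_x[k] = prev
--             if line[k] == 'X':
--                 prev = k
--         has_x = [False] * (n + 1)    # has_x[k] = some 'X' at index >= k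
--         for k in range(n - 1, -1, -1):
--             has_x[k] = has_x[k + 1] or line[k] == 'X'
--         chars = []
--         for k in range(n):
--             if line[k] != ' ':
--                 chars.append('X')
--             else:
--                 i = last_x[k]
--                 wet = i is not None and line[i + 1] == ' ' and has_x[k + 1]
--                 chars.append('O' if wet else ' ')
--         art_after_rain.append(''.join(chars))
--     return art_after_rain
-- ===== Notes on version B (the rewrite author's own statement) =====
-- stated objective: alternative
-- what changed: Replaced the per-line nested scans (for every X-followed-by-space rescan the rest of the line for the closing X, then for every space scan the pool list) by two single passes that precompute nearest-X-to-the-left and has-X-to-the-right arrays, deciding each position from those arrays.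
import Mathlib
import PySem

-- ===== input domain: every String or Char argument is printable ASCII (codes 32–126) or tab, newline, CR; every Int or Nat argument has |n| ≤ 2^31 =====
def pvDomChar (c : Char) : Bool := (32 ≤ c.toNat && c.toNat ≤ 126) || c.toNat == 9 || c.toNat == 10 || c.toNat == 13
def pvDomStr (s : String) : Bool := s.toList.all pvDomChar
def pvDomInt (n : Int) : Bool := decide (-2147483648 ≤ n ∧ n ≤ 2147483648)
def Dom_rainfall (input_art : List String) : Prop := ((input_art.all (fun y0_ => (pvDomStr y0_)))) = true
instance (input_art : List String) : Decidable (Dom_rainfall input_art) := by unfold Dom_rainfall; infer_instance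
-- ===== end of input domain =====

-- B fills each line in two linear passes (nearest-X-left / has-X-right arrays) instead of A's
-- nested rescans; equivalence of the two per-line programs is proved position by position.

-- ===== PORT A =====
-- inner 'for ii_char_index in range(char_index+1, len(line))' with its two breaks
-- (A's surrounding 'while' always runs this scan exactly once)
def pvPoolScan (cs : List Char) (i : Nat) : List Nat → Option (Nat × Nat)
  | [] => none
  | j :: rest => if cs.getD j ' ' = 'X' then some (i, j) else pvPoolScan cs i rest

def pvPoolsA (cs : List Char) : List (Nat × Nat) :=
  (List.range cs.length).foldl (fun ps i =>
    if cs.getD i ' ' = 'X' ∧ i ≠ cs.length - 1 then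
      if cs.getD (i + 1) ' ' = ' ' then
        match pvPoolScan cs i (List.range' (i + 1) (cs.length - (i + 1))) with
        | some p => ps ++ [p]
        | none => ps
      else ps
    else ps) []

def pvLineA (cs : List Char) : List Char :=
  (List.range cs.length).foldl (fun acc k =>
    acc ++ [if cs.getD k ' ' = ' ' then
              (if (pvPoolsA cs).any (fun p => decide (p.1 ≤ k ∧ k < p.2)) then 'O' else ' ')
            else 'X']) []

def rainfall (input_art : List String) : List String :=
  input_art.foldl (fun acc s => acc ++ [String.mk (pvLineA s.toList)]) []

-- ===== PORT B =====
-- last_x[k] = greatest i < k with line[i] == 'X' (None if no such i), built in one pass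
def pvLastXs (cs : List Char) : List (Option Nat) :=
  ((List.range cs.length).foldl (fun (st : Option Nat × List (Option Nat)) k =>
      (if cs.getD k ' ' = 'X' then some k else st.1, st.2 ++ [st.1])) (none, [])).2

-- has_x[k] = some 'X' at index ≥ k, filled right-to-left
def pvHasXsuf : List Char → List Bool
  | [] => [false]
  | c :: rest => ((pvHasXsuf rest).headD false || (c = 'X')) :: pvHasXsuf rest

def pvLineB (cs : List Char) : List Char :=
  let lx := pvLastXs cs
  let hx := pvHasXsuf cs
  (List.range cs.length).map (fun k =>
    if cs.getD k ' ' ≠ ' ' then 'X'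
    else match lx.getD k none with
      | none => ' '
      | some i => if cs.getD (i + 1) ' ' = ' ' ∧ hx.getD (k + 1) false = true then 'O' else ' ')

def rainfall_alt (input_art : List String) : List String :=
  input_art.map (fun s => String.mk (pvLineB s.toList))

-- ===== PRECONDITION & SPEC =====
def Spec_rainfall (input_art : List String) (out : List String) : Prop := out = rainfall_alt input_art
instance (input_art : List String) (out : List String) : Decidable (Spec_rainfall input_art out) := by unfold Spec_rainfall; infer_instance

-- ===== CLAIM (what is proved, stated in full; the proofs are below) =====
def Claim_equal_rainfall : Prop := ∀ (input_art : List String), Dom_rainfall input_art → Spec_rainfall input_art (rainfall input_art)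

-- ===== LEMMAS AND PROOFS =====

-- spec of B's last_x entry at position k
def pvLastSpec (cs : List Char) : Nat → Option Nat
  | 0 => none
  | k + 1 => if cs.getD k ' ' = 'X' then some k else pvLastSpec cs k

lemma pvLastXs_state (cs : List Char) (m : Nat) :
    (List.range m).foldl (fun (st : Option Nat × List (Option Nat)) k =>
      (if cs.getD k ' ' = 'X' then some k else st.1, st.2 ++ [st.1])) (none, [])
    = (pvLastSpec cs m, (List.range m).map (pvLastSpec cs)) := by
  induction m with
  | zero => simp [pvLastSpec]
  | succ m ih =>
    rw [List.range_succ, List.foldl_append, List.foldl_cons, List.foldl_nil, ih]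
    simp [pvLastSpec]

lemma pvLastXs_eq (cs : List Char) :
    pvLastXs cs = (List.range cs.length).map (pvLastSpec cs) := by
  rw [pvLastXs, pvLastXs_state]

lemma pvLastSpec_some (cs : List Char) (k i : Nat) (h : pvLastSpec cs k = some i) :
    i < k ∧ cs.getD i ' ' = 'X' ∧ ∀ j, i < j → j < k → cs.getD j ' ' ≠ 'X' := by
  induction k with
  | zero => simp [pvLastSpec] at h
  | succ k ih =>
    simp only [pvLastSpec] at h
    split at h
    · rename_i hx
      cases h
      exact ⟨Nat.lt_succ_self _, hx, fun j hj1 hj2 _ => by omega⟩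
    · rename_i hx
      obtain ⟨h1, h2, h3⟩ := ih h
      refine ⟨by omega, h2, fun j hj1 hj2 => ?_⟩
      rcases Nat.lt_or_ge j k with hl | hl
      · exact h3 j hj1 hl
      · have : j = k := by omega
        subst this; exact hx

lemma pvLastSpec_of (cs : List Char) (k i : Nat) (hik : i < k) (hx : cs.getD i ' ' = 'X')
    (hno : ∀ j, i < j → j < k → cs.getD j ' ' ≠ 'X') : pvLastSpec cs k = some i := by
  induction k with
  | zero => omega
  | succ k ih =>
    simp only [pvLastSpec]
    rcases Nat.lt_or_ge i k with hl | hl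
    · rw [if_neg (hno k hl (Nat.lt_succ_self _))]
      exact ih hl (fun j h1 h2 => hno j h1 (by omega))
    · have : i = k := by omega
      subst this; rw [if_pos hx]

-- spec of B's has_x entry
lemma pvHasXsuf_getD (cs : List Char) (k : Nat) :
    (pvHasXsuf cs).getD k false = (cs.drop k).any (fun c => c = 'X') := by
  induction cs generalizing k with
  | nil => cases k <;> simp [pvHasXsuf]
  | cons c rest ih =>
    cases k with
    | zero =>
      have hh : (pvHasXsuf rest).headD false = (pvHasXsuf rest).getD 0 false := by
        cases h : pvHasXsuf rest <;> simp [List.getD]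
      simp only [pvHasXsuf, List.getD_cons_zero, List.drop_zero, List.any_cons, hh, ih 0]
      simp [Bool.or_comm]
    | succ k => simp only [pvHasXsuf, List.getD_cons_succ, ih k, List.drop_succ_cons]

lemma pvHasXsuf_iff (cs : List Char) (k : Nat) :
    (pvHasXsuf cs).getD k false = true ↔ ∃ j, k ≤ j ∧ j < cs.length ∧ cs.getD j ' ' = 'X' := by
  rw [pvHasXsuf_getD, List.any_eq_true]
  constructor
  · rintro ⟨x, hx, hP⟩
    obtain ⟨j, hj, hget⟩ := List.mem_iff_getElem.mp hx
    rw [List.getElem_drop] at hget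
    refine ⟨k + j, by omega, by have := hj; simp [List.length_drop] at this; omega, ?_⟩
    rw [List.getD_eq_getElem _ _ (by have := hj; simp [List.length_drop] at this; omega)]
    simp_all
  · rintro ⟨j, h1, h2, h3⟩
    refine ⟨cs.getD j ' ', ?_, by rw [h3]; simp⟩
    rw [List.getD_eq_getElem _ _ h2]
    apply List.mem_iff_getElem.mpr
    exact ⟨j - k, by simp [List.length_drop]; omega, by rw [List.getElem_drop]; congr 1; omega⟩

-- spec of A's inner scan over a consecutive range of indices
lemma pvPoolScan_some (cs : List Char) (i : Nat) (len start : Nat) (p : Nat × Nat)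
    (h : pvPoolScan cs i (List.range' start len) = some p) :
    p.1 = i ∧ start ≤ p.2 ∧ p.2 < start + len ∧ cs.getD p.2 ' ' = 'X' ∧
      ∀ j, start ≤ j → j < p.2 → cs.getD j ' ' ≠ 'X' := by
  induction len generalizing start with
  | zero => simp [pvPoolScan] at h
  | succ len ih =>
    rw [List.range'_succ] at h
    simp only [pvPoolScan] at h
    split at h
    · rename_i hx
      cases h
      exact ⟨rfl, le_refl _, by omega, hx, fun j h1 h2 => by omega⟩
    · rename_i hx
      obtain ⟨h1, h2, h3, h4, h5⟩ := ih (start + 1) h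
      refine ⟨h1, by omega, by omega, h4, fun j hj1 hj2 => ?_⟩
      rcases Nat.lt_or_ge j (start + 1) with hl | hl
      · have : j = start := by omega
        subst this; exact hx
      · exact h5 j hl hj2

lemma pvPoolScan_none (cs : List Char) (i : Nat) (len start : Nat)
    (h : pvPoolScan cs i (List.range' start len) = none) :
    ∀ j, start ≤ j → j < start + len → cs.getD j ' ' ≠ 'X' := by
  induction len generalizing start with
  | zero => omega
  | succ len ih =>
    rw [List.range'_succ] at h
    simp only [pvPoolScan] at h
    split at h
    · simp at h
    · rename_i hx
      intro j hj1 hj2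
      rcases Nat.lt_or_ge j (start + 1) with hl | hl
      · have : j = start := by omega
        subst this; exact hx
      · exact ih (start + 1) h j hl (by omega)

-- membership in A's pool list
lemma pvPoolsA_state (cs : List Char) (m : Nat) (p : Nat × Nat) :
    p ∈ (List.range m).foldl (fun ps i =>
      if cs.getD i ' ' = 'X' ∧ i ≠ cs.length - 1 then
        if cs.getD (i + 1) ' ' = ' ' then
          match pvPoolScan cs i (List.range' (i + 1) (cs.length - (i + 1))) with
          | some q => ps ++ [q]
          | none => ps
        else ps
      else ps) ([] : List (Nat × Nat))
    ↔ ∃ i, i < m ∧ cs.getD i ' ' = 'X' ∧ i ≠ cs.length - 1 ∧ cs.getD (i + 1) ' ' = ' ' ∧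
        pvPoolScan cs i (List.range' (i + 1) (cs.length - (i + 1))) = some p := by
  induction m with
  | zero => simp
  | succ m ih =>
    rw [List.range_succ, List.foldl_append, List.foldl_cons, List.foldl_nil]
    by_cases h1 : cs.getD m ' ' = 'X' ∧ m ≠ cs.length - 1
    · rw [if_pos h1]
      by_cases h2 : cs.getD (m + 1) ' ' = ' '
      · rw [if_pos h2]
        cases hscan : pvPoolScan cs m (List.range' (m + 1) (cs.length - (m + 1))) with
        | none =>
          simp only [ih]
          constructor
          · rintro ⟨i, hi, rest⟩; exact ⟨i, by omega, rest⟩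
          · rintro ⟨i, hi, hb, hc, hd, he⟩
            refine ⟨i, ?_, hb, hc, hd, he⟩
            rcases Nat.lt_or_ge i m with hl | hl
            · exact hl
            · exfalso; have : i = m := by omega
              subst this; rw [hscan] at he; exact absurd he (by simp)
        | some q =>
          rw [List.mem_append, ih]
          constructor
          · rintro (⟨i, hi, rest⟩ | hq)
            · exact ⟨i, by omega, rest⟩
            · simp at hq; subst hq
              exact ⟨m, Nat.lt_succ_self _, h1.1, h1.2, h2, hscan⟩
          · rintro ⟨i, hi, hb, hc, hd, he⟩
            rcases Nat.lt_or_ge i m with hl | hl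
            · exact Or.inl ⟨i, hl, hb, hc, hd, he⟩
            · have : i = m := by omega
              subst this; rw [hscan] at he
              cases he; simp
      · rw [if_neg h2, ih]
        constructor
        · rintro ⟨i, hi, rest⟩; exact ⟨i, by omega, rest⟩
        · rintro ⟨i, hi, hb, hc, hd, he⟩
          refine ⟨i, ?_, hb, hc, hd, he⟩
          rcases Nat.lt_or_ge i m with hl | hl
          · exact hl
          · exfalso; have : i = m := by omega
            subst this; exact h2 hd
    · rw [if_neg h1, ih]
      constructor
      · rintro ⟨i, hi, rest⟩; exact ⟨i, by omega, rest⟩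
      · rintro ⟨i, hi, hb, hc, hd, he⟩
        refine ⟨i, ?_, hb, hc, hd, he⟩
        rcases Nat.lt_or_ge i m with hl | hl
        · exact hl
        · exfalso; have : i = m := by omega
          subst this; exact h1 ⟨hb, hc⟩

-- the per-position wet conditions of A and B agree on space positions
lemma pvWet_iff (cs : List Char) (k : Nat) (hk : k < cs.length) (hsp : cs.getD k ' ' = ' ') :
    ((pvPoolsA cs).any (fun p => decide (p.1 ≤ k ∧ k < p.2)) = true)
    ↔ (∃ i, pvLastSpec cs k = some i ∧ cs.getD (i + 1) ' ' = ' ' ∧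
        (pvHasXsuf cs).getD (k + 1) false = true) := by
  rw [List.any_eq_true]
  constructor
  · rintro ⟨p, hp, hcov⟩
    simp only [decide_eq_true_eq] at hcov
    rw [pvPoolsA, pvPoolsA_state] at hp
    obtain ⟨i, him, hxi, hne, hsp1, hscan⟩ := hp
    obtain ⟨hp1, hlo, hhi, hxj, hnoX⟩ := pvPoolScan_some cs i _ _ p hscan
    subst hp1
    have hik : p.1 < k := by
      rcases Nat.lt_or_ge p.1 k with h | h
      · exact h
      · exfalso; have : p.1 = k := by omega
        rw [this, hsp] at hxi; exact absurd hxi (by decide)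
    refine ⟨p.1, pvLastSpec_of cs k p.1 hik hxi ?_, hsp1, ?_⟩
    · intro j hj1 hj2
      exact hnoX j (by omega) (by omega)
    · rw [pvHasXsuf_iff]
      exact ⟨p.2, by omega, by omega, hxj⟩
  · rintro ⟨i, hlast, hsp1, hright⟩
    obtain ⟨hik, hxi, hnoX⟩ := pvLastSpec_some cs k i hlast
    obtain ⟨j0, hj1, hj2, hj3⟩ := (pvHasXsuf_iff cs (k + 1)).mp hright
    have hne : i ≠ cs.length - 1 := by omega
    cases hscan : pvPoolScan cs i (List.range' (i + 1) (cs.length - (i + 1))) with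
    | none =>
      exact absurd hj3 (pvPoolScan_none cs i _ _ hscan j0 (by omega) (by omega))
    | some p =>
      obtain ⟨hp1, hlo, hhi, hxj, hno2⟩ := pvPoolScan_some cs i _ _ p hscan
      refine ⟨p, ?_, ?_⟩
      · rw [pvPoolsA, pvPoolsA_state]
        exact ⟨i, by omega, hxi, hne, hsp1, hscan⟩
      · simp only [decide_eq_true_eq]
        subst hp1
        constructor
        · omega
        · -- p.2 > k: no X in (p.1, k] so the first X found is past k
          by_contra hle
          rw [Nat.not_lt] at hle
          rcases Nat.lt_or_ge p.2 k with hl | hl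
          · exact hnoX p.2 (by omega) hl hxj
          · have : p.2 = k := by omega
            rw [this, hsp] at hxj; exact absurd hxj (by decide)

lemma pvLineA_eq_map (cs : List Char) :
    pvLineA cs = (List.range cs.length).map (fun k =>
      if cs.getD k ' ' = ' ' then
        (if (pvPoolsA cs).any (fun p => decide (p.1 ≤ k ∧ k < p.2)) then 'O' else ' ')
      else 'X') := by
  rw [pvLineA, PySem.List.foldl_append_singleton_eq_map, List.nil_append]

lemma pvLine_eq (cs : List Char) : pvLineA cs = pvLineB cs := by
  rw [pvLineA_eq_map, pvLineB]
  apply List.map_congr_left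
  intro k hk
  rw [List.mem_range] at hk
  by_cases hsp : cs.getD k ' ' = ' '
  · have hne : ¬(cs.getD k ' ' ≠ ' ') := not_not_intro hsp
    rw [if_pos hsp, if_neg hne]
    have hlx : (pvLastXs cs).getD k none = pvLastSpec cs k := by
      rw [pvLastXs_eq, List.getD_eq_getElem _ _ (by simpa using hk)]
      simp
    rw [hlx]
    by_cases hwet : (pvPoolsA cs).any (fun p => decide (p.1 ≤ k ∧ k < p.2)) = true
    · rw [if_pos hwet]
      obtain ⟨i, hi, h2, h3⟩ := (pvWet_iff cs k hk hsp).mp hwet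
      rw [hi]
      show 'O' = if cs.getD (i + 1) ' ' = ' ' ∧ (pvHasXsuf cs).getD (k + 1) false = true then 'O' else ' '
      rw [if_pos ⟨h2, h3⟩]
    · rw [if_neg hwet]
      cases hcase : pvLastSpec cs k with
      | none => rfl
      | some i =>
        show ' ' = if cs.getD (i + 1) ' ' = ' ' ∧ (pvHasXsuf cs).getD (k + 1) false = true then 'O' else ' '
        rw [if_neg (fun hand => hwet ((pvWet_iff cs k hk hsp).mpr ⟨i, hcase, hand.1, hand.2⟩))]
  · rw [if_neg hsp, if_pos hsp]

-- ===== VERDICT (by name: the statement is the Claim_ definition above) =====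
theorem rainfall_spec : Claim_equal_rainfall := by
  intro input_art _
  unfold Spec_rainfall rainfall rainfall_alt
  rw [PySem.List.foldl_append_singleton_eq_map]
  exact List.map_congr_left (fun s _ => by rw [pvLine_eq])
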